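-- pv_equiv track=rewrite | github.com/rixyn/hyperskill-python-core | learning_progress_tracker/stage4.py | find_highest_and_lowest_activity
-- ===== SOURCE A (Python) =====
-- def find_highest_and_lowest_activity(activity_stats):
--     max_activity = max(activity_stats.values(), default=0)
--     min_activity = min(activity_stats.values(), default=0)
--
--     highest_activity = [course for course,
--                         count in activity_stats.items() if count == max_activity]
--     lowest_activity = [course for course,
--                        count in activity_stats.items() if count == min_activity]
--
--     return highest_activity, lowest_activity
-- ===== SOURCE B (Python) =====
-- def find_highest_and_lowest_activity(activity_stats):
--     groups = {}
--     for course, count in activity_stats.items():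
--         groups.setdefault(count, []).append(course)
--     if not groups:
--         return [], []
--     return groups[max(groups)], groups[min(groups)]
-- ===== Notes on version B (the rewrite author's own statement) =====
-- stated objective: alternative
-- what changed: B makes one grouping pass that buckets courses by their count in a dict, then looks up the max-key and min-key buckets, instead of computing max and min of the values and re-scanning the items twice to filter.
import Mathlib
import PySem

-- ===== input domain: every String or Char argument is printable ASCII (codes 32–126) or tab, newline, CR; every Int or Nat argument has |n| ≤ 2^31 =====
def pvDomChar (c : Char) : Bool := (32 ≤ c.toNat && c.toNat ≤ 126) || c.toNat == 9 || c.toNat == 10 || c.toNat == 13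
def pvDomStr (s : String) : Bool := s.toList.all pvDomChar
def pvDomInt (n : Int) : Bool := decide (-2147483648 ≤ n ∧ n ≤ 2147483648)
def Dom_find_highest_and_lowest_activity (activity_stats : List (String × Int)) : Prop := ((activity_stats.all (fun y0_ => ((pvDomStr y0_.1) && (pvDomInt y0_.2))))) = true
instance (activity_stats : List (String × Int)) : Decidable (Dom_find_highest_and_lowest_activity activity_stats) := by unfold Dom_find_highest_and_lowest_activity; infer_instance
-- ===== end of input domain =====

-- B groups courses by count into a dict in one pass and returns the max-key and min-key
-- buckets, instead of A's max/min over values followed by two filtering re-scans.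

-- ===== PORT A =====
def find_highest_and_lowest_activity (activity_stats : List (String × Int)) : List String × List String :=
  let max_activity := PySem.List.maxD (activity_stats.map (·.2)) (fun v => v) 0
  let min_activity := PySem.List.minD (activity_stats.map (·.2)) (fun v => v) 0
  let highest := (activity_stats.filter (fun p => p.2 == max_activity)).map (·.1)
  let lowest := (activity_stats.filter (fun p => p.2 == min_activity)).map (·.1)
  (highest, lowest)

-- ===== PORT B =====
def find_highest_and_lowest_activity_alt (activity_stats : List (String × Int)) : List String × List String :=
  let groups : PySem.Dict Int (List String) :=
    activity_stats.foldl (fun d p => d.modify p.2 [] (fun l => l ++ [p.1])) PySem.Dict.empty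
  match PySem.List.max? groups.keys (fun v => v), PySem.List.min? groups.keys (fun v => v) with
  | some hi, some lo => (groups.getD hi [], groups.getD lo [])
  | _, _ => ([], [])

-- ===== PRECONDITION & SPEC =====
def Spec_find_highest_and_lowest_activity (activity_stats : List (String × Int)) (out : List String × List String) : Prop := out = find_highest_and_lowest_activity_alt activity_stats
instance (activity_stats : List (String × Int)) (out : List String × List String) : Decidable (Spec_find_highest_and_lowest_activity activity_stats out) := by unfold Spec_find_highest_and_lowest_activity; infer_instance

-- ===== CLAIM (what is proved, stated in full; the proofs are below) =====
def Claim_equal_find_highest_and_lowest_activity : Prop := ∀ (activity_stats : List (String × Int)), Dom_find_highest_and_lowest_activity activity_stats → Spec_find_highest_and_lowest_activity activity_stats (find_highest_and_lowest_activity activity_stats)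

-- ===== LEMMAS AND PROOFS =====

-- B's grouping dict, named for the lemmas below.
def pvGroups (xs : List (String × Int)) : PySem.Dict Int (List String) :=
  xs.foldl (fun d p => d.modify p.2 [] (fun l => l ++ [p.1])) PySem.Dict.empty

-- the bucket at key c is exactly A's filter of the items with count c
theorem pvGroups_getD (xs : List (String × Int)) (c : Int) :
    (pvGroups xs).getD c [] = (xs.filter (fun p => p.2 == c)).map (·.1) := by
  have h := PySem.Dict.getD_foldl_modify_append (xs.map (fun p => (p.2, p.1)))
      (PySem.Dict.empty (κ := Int) (ν := List String)) c
  simpa [pvGroups, List.foldl_map, List.filter_map, List.map_map, Function.comp] using h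

-- the key set of the grouping dict is the deduplicated value list
theorem pvGroups_keys (xs : List (String × Int)) :
    (pvGroups xs).keys = PySem.Set.ofList (xs.map (·.2)) := by
  have h := PySem.Dict.keys_foldl_modify_key xs (fun p => p.2) []
      (fun _ p l => l ++ [p.1]) PySem.Dict.empty
  simpa [pvGroups, PySem.Dict.keys_empty, PySem.Set.update_nil_left] using h

-- max over the deduplicated values is the max over the values
theorem pvMax_dedup (vs : List Int) (m m' : Int)
    (h : PySem.List.max? (PySem.Set.ofList vs) (fun v => v) = some m)
    (h' : PySem.List.max? vs (fun v => v) = some m') : m = m' := by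
  have hm : m ∈ vs := (PySem.Set.mem_ofList vs m).mp (PySem.List.max?_mem h)
  have hm' : m' ∈ PySem.Set.ofList vs := (PySem.Set.mem_ofList vs m').mpr (PySem.List.max?_mem h')
  exact le_antisymm (PySem.List.max?_isMax h' m hm) (PySem.List.max?_isMax h m' hm')

theorem pvMin_dedup (vs : List Int) (m m' : Int)
    (h : PySem.List.min? (PySem.Set.ofList vs) (fun v => v) = some m)
    (h' : PySem.List.min? vs (fun v => v) = some m') : m = m' := by
  have hm : m ∈ vs := (PySem.Set.mem_ofList vs m).mp (PySem.List.min?_mem h)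
  have hm' : m' ∈ PySem.Set.ofList vs := (PySem.Set.mem_ofList vs m').mpr (PySem.List.min?_mem h')
  exact le_antisymm (PySem.List.min?_isMin h m' hm') (PySem.List.min?_isMin h' m hm)

-- ===== VERDICT (by name: the statement is the Claim_ definition above) =====
theorem find_highest_and_lowest_activity_spec : Claim_equal_find_highest_and_lowest_activity := by
  intro xs _
  unfold Spec_find_highest_and_lowest_activity
  show find_highest_and_lowest_activity xs = find_highest_and_lowest_activity_alt xs
  have hg : (xs.foldl (fun d p => d.modify p.2 [] (fun l => l ++ [p.1])) PySem.Dict.empty)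
      = pvGroups xs := rfl
  cases hxs : xs with
  | nil => rfl
  | cons y ys =>
    subst hxs
    have hvs : (y :: ys).map (·.2) ≠ [] := by simp
    obtain ⟨m', hmax'⟩ := Option.ne_none_iff_exists'.mp
      (fun h => hvs ((PySem.List.max?_eq_none_iff ((y :: ys).map (·.2)) (fun v => v)).mp h))
    obtain ⟨n', hmin'⟩ := Option.ne_none_iff_exists'.mp
      (fun h => hvs ((PySem.List.min?_eq_none_iff ((y :: ys).map (·.2)) (fun v => v)).mp h))
    have hkeys := pvGroups_keys (y :: ys)
    have hkne : (pvGroups (y :: ys)).keys ≠ [] := by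
      rw [hkeys]
      intro h
      have : y.2 ∈ PySem.Set.ofList ((y :: ys).map (·.2)) :=
        (PySem.Set.mem_ofList _ _).mpr (by simp)
      rw [h] at this; simp at this
    obtain ⟨m, hmax⟩ := Option.ne_none_iff_exists'.mp
      (fun h => hkne ((PySem.List.max?_eq_none_iff (pvGroups (y :: ys)).keys (fun v => v)).mp h))
    obtain ⟨n, hmin⟩ := Option.ne_none_iff_exists'.mp
      (fun h => hkne ((PySem.List.min?_eq_none_iff (pvGroups (y :: ys)).keys (fun v => v)).mp h))
    have hmeq : m = m' := pvMax_dedup _ _ _ (hkeys ▸ hmax) hmax'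
    have hneq : n = n' := pvMin_dedup _ _ _ (hkeys ▸ hmin) hmin'
    simp only [find_highest_and_lowest_activity, find_highest_and_lowest_activity_alt, hg,
      hmax, hmin, PySem.List.maxD, PySem.List.minD, hmax', hmin', Option.getD_some]
    rw [pvGroups_getD, pvGroups_getD, hmeq, hneq]
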